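-- pv_equiv track=rewrite | github.com/KenBryanGuadarramaHerrera/Criptografia | Cifrado Wheatstone/Main.py | preprocesar_mensaje
-- ===== SOURCE A (Python) =====
-- import string
--
-- def preprocesar_mensaje(mensaje):
--     mensaje = mensaje.lower().replace('j', 'i')  # Tratar 'j' como 'i'
--     mensaje = ''.join([char for char in mensaje if char in string.ascii_lowercase])  # Mantener solo letras
--     if len(mensaje) % 2 != 0:  # Agregar 'x' si la longitud del mensaje es impar
--         mensaje += 'x'
--     pares = []
--     i = 0
--     while i < len(mensaje):
--         if i + 1 < len(mensaje) and mensaje[i] == mensaje[i + 1]:  # Insertar 'x' entre letras repetidas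
--             pares.append(mensaje[i] + 'x')
--             i += 1
--         else:
--             pares.append(mensaje[i:i + 2])
--             i += 2
--     return pares
-- ===== SOURCE B (Python) =====
-- import string
--
-- def preprocesar_mensaje(mensaje):
--     limpio = mensaje.lower().replace('j', 'i')
--     limpio = ''.join([char for char in limpio if char in string.ascii_lowercase])
--     if len(limpio) % 2 != 0:
--         limpio += 'x'
--     buf = []
--     for c in limpio:
--         if len(buf) % 2 == 1 and buf[-1] == c:
--             buf.append('x')
--         buf.append(c)
--     return [''.join(buf[k:k + 2]) for k in range(0, len(buf), 2)]
-- ===== Notes on version B (the rewrite author's own statement) =====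
-- stated objective: alternative
-- what changed: A's look-ahead while loop with variable increment (1 or 2) is replaced by a look-behind single forward pass that inserts the separator letters into a flat buffer, followed by a uniform slice-based chunking into pairs.
import Mathlib
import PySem

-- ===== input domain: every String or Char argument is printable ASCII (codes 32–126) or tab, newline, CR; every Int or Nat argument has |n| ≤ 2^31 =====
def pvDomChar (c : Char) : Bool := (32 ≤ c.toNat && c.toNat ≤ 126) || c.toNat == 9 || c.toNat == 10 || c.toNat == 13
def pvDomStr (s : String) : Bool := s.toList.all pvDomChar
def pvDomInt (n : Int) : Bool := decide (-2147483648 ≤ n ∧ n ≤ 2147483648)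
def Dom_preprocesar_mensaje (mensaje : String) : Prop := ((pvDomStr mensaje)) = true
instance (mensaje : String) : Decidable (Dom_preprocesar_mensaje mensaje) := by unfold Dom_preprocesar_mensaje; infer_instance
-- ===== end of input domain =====

-- B replaces A's look-ahead variable-increment while loop by a look-behind single pass that
-- inserts the separator letters into a flat buffer, followed by a uniform chunking into pairs
-- (objective: alternative decomposition, same cost).

-- ===== PORT A =====
-- A's while loop over the index i: look ahead one character, advance by 1 or 2.
def pvLoopA (m : List Char) (i : Nat) : List String :=
  if _h : i < m.length then
    if i + 1 < m.length ∧ m[i]? = m[i + 1]? then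
      String.ofList (PySem.List.slice m (some (i : Int)) (some ((i : Int) + 1)) ++ ['x']) :: pvLoopA m (i + 1)
    else
      String.ofList (PySem.List.slice m (some (i : Int)) (some ((i : Int) + 2))) :: pvLoopA m (i + 2)
  else []
termination_by m.length - i

def preprocesar_mensaje (mensaje : String) : List String :=
  let m0 : List Char := (PySem.Str.replace (PySem.Str.lower mensaje) "j" "i").toList
  let m1 : List Char := m0.filter (fun c => "abcdefghijklmnopqrstuvwxyz".toList.contains c)
  let m2 : List Char := if m1.length % 2 ≠ 0 then m1 ++ ['x'] else m1
  pvLoopA m2 0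

-- ===== PORT B =====
-- B's single forward pass: before appending c to the buffer, insert the separator when the buffer
-- length is odd and its last element equals c.
def pvStepB (buf : List Char) (c : Char) : List Char :=
  if buf.length % 2 = 1 ∧ PySem.List.pyGet? buf (-1) = some c then buf ++ ['x', c] else buf ++ [c]

def preprocesar_mensaje_alt (mensaje : String) : List String :=
  let m0 : List Char := (PySem.Str.replace (PySem.Str.lower mensaje) "j" "i").toList
  let m1 : List Char := m0.filter (fun c => "abcdefghijklmnopqrstuvwxyz".toList.contains c)
  let m2 : List Char := if m1.length % 2 ≠ 0 then m1 ++ ['x'] else m1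
  let buf : List Char := m2.foldl pvStepB []
  (PySem.List.pyRange 0 (buf.length : Int) 2).map
    (fun k => String.ofList (PySem.List.slice buf (some k) (some (k + 2))))

-- ===== PRECONDITION & SPEC =====
def Spec_preprocesar_mensaje (mensaje : String) (out : List String) : Prop := out = preprocesar_mensaje_alt mensaje
instance (mensaje : String) (out : List String) : Decidable (Spec_preprocesar_mensaje mensaje out) := by unfold Spec_preprocesar_mensaje; infer_instance

-- ===== CLAIM (what is proved, stated in full; the proofs are below) =====
def Claim_equal_preprocesar_mensaje : Prop := ∀ (mensaje : String), Dom_preprocesar_mensaje mensaje → Spec_preprocesar_mensaje mensaje (preprocesar_mensaje mensaje)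

-- ===== LEMMAS AND PROOFS =====

-- Reference digraph function: the common value of both ports on the cleaned, padded list.
def pvPairs : List Char → List (List Char)
  | [] => []
  | [c] => [[c]]
  | a :: b :: r => if a = b then [a, 'x'] :: pvPairs (b :: r) else [a, b] :: pvPairs r

-- B's buffer construction as a pure function (pvGoE: buffer even; pvGoO: buffer odd, last = c).
mutual
def pvGoE : List Char → List Char
  | [] => []
  | c :: r => c :: pvGoO c r
def pvGoO (last : Char) : List Char → List Char
  | [] => []
  | c :: r => if c = last then 'x' :: c :: pvGoO c r else c :: pvGoE r
end

-- Chunking into pairs, structurally.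
def pvChunk : List Char → List (List Char)
  | [] => []
  | [a] => [[a]]
  | a :: b :: r => [a, b] :: pvChunk r

lemma pvLoopA_eq (m : List Char) (i : Nat) :
    pvLoopA m i = (pvPairs (m.drop i)).map String.ofList := by
  induction i using pvLoopA.induct m with
  | case1 i h hc ih =>
    obtain ⟨h1, h2⟩ := hc
    rw [pvLoopA]
    rw [dif_pos h, if_pos ⟨h1, h2⟩, ih]
    rw [List.drop_eq_getElem_cons h, List.drop_eq_getElem_cons h1]
    have hmi : m[i] = m[i + 1] := by
      have := h2
      rw [List.getElem?_eq_getElem h, List.getElem?_eq_getElem h1] at this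
      exact Option.some.inj this
    have hsl : PySem.List.slice m (some (i : Int)) (some ((i : Int) + 1)) = [m[i]] := by
      rw [show ((i : Int) + 1) = ((i + 1 : Nat) : Int) by push_cast; ring, PySem.List.slice_natCast,
        show i + 1 - i = 1 by omega, List.drop_eq_getElem_cons h, List.take_succ_cons, List.take_zero]
    rw [hsl]
    simp only [pvPairs, if_pos hmi, List.map_cons]
    rw [← List.drop_eq_getElem_cons h1]
    rfl
  | case2 i h hc ih =>
    rw [pvLoopA]
    rw [dif_pos h, if_neg hc, ih]
    have hsl : PySem.List.slice m (some (i : Int)) (some ((i : Int) + 2)) = (m.drop i).take 2 := by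
      rw [show ((i : Int) + 2) = ((i + 2 : Nat) : Int) by push_cast; ring, PySem.List.slice_natCast]
      congr 1
      omega
    rw [hsl]
    by_cases h1 : i + 1 < m.length
    · have hne : m[i] ≠ m[i + 1] := by
        intro he
        exact hc ⟨h1, by rw [List.getElem?_eq_getElem h, List.getElem?_eq_getElem h1, he]⟩
      rw [List.drop_eq_getElem_cons h, List.drop_eq_getElem_cons h1]
      simp only [pvPairs, if_neg hne, List.take, List.map_cons]
    · have hd2 : m.drop (i + 1) = [] := List.drop_eq_nil_of_le (by omega)
      have hd3 : m.drop (i + 2) = [] := List.drop_eq_nil_of_le (by omega)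
      rw [List.drop_eq_getElem_cons h, hd2, hd3]
      simp [pvPairs]
  | case3 i h =>
    rw [pvLoopA]
    rw [dif_neg h, List.drop_eq_nil_of_le (by omega)]
    simp [pvPairs]

lemma pvFoldl_step (l : List Char) :
    (∀ buf : List Char, buf.length % 2 = 0 → l.foldl pvStepB buf = buf ++ pvGoE l) ∧
    (∀ (buf : List Char) (c : Char), buf.length % 2 = 1 → buf.getLast? = some c →
      l.foldl pvStepB buf = buf ++ pvGoO c l) := by
  induction l with
  | nil => simp [pvGoE, pvGoO]
  | cons d r ih =>
    constructor
    · intro buf hev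
      have hstep : pvStepB buf d = buf ++ [d] := by
        unfold pvStepB; rw [if_neg]; rintro ⟨h1, -⟩; omega
      rw [List.foldl_cons, hstep,
        ih.2 (buf ++ [d]) d (by simp; omega) List.getLast?_concat]
      simp [pvGoE]
    · intro buf c hodd hlast
      rw [List.foldl_cons]
      by_cases hdc : d = c
      · subst hdc
        have hstep : pvStepB buf d = buf ++ ['x', d] := by
          unfold pvStepB
          rw [if_pos ⟨hodd, by rw [PySem.List.pyGet?_neg_one, hlast]⟩]
        have hlast2 : (buf ++ ['x', d]).getLast? = some d := by
          rw [show buf ++ ['x', d] = (buf ++ ['x']) ++ [d] by simp]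
          exact List.getLast?_concat
        rw [hstep, ih.2 (buf ++ ['x', d]) d (by simp; omega) hlast2]
        simp [pvGoO]
      · have hstep : pvStepB buf d = buf ++ [d] := by
          unfold pvStepB
          rw [if_neg]
          rintro ⟨-, h2⟩
          rw [PySem.List.pyGet?_neg_one, hlast] at h2
          exact hdc (Option.some.inj h2).symm
        rw [hstep, ih.1 (buf ++ [d]) (by simp; omega)]
        simp [pvGoO, hdc]

lemma pvChunk_go (l : List Char) :
    pvChunk (pvGoE l) = pvPairs l ∧
    (∀ c : Char, pvChunk (c :: pvGoO c l) = pvPairs (c :: l)) := by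
  induction l with
  | nil => simp [pvGoE, pvGoO, pvChunk, pvPairs]
  | cons d r ih =>
    refine ⟨?_, ?_⟩
    · show pvChunk (pvGoE (d :: r)) = pvPairs (d :: r)
      rw [pvGoE]
      exact ih.2 d
    · intro c
      rw [pvGoO]
      by_cases h : d = c
      · subst h
        rw [if_pos rfl]
        rw [show pvChunk (d :: 'x' :: d :: pvGoO d r) = [d, 'x'] :: pvChunk (d :: pvGoO d r) from rfl,
          ih.2 d]
        simp [pvPairs]
      · rw [if_neg h]
        rw [show pvChunk (c :: d :: pvGoE r) = [c, d] :: pvChunk (pvGoE r) from rfl, ih.1]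
        have hcd : c ≠ d := fun he => h he.symm
        simp [pvPairs, hcd]

lemma pvRange_two_cons (a b : Int) (h : a < b) :
    PySem.List.pyRange a b 2 = a :: PySem.List.pyRange (a + 2) b 2 := by
  rw [PySem.List.pyRange_of_pos _ _ (by norm_num), PySem.List.pyRange_of_pos _ _ (by norm_num)]
  by_cases h2 : a + 2 < b
  · have hn : (if a < b then ((b - a + 2 - 1) / 2).toNat else 0)
        = (if a + 2 < b then ((b - (a + 2) + 2 - 1) / 2).toNat else 0) + 1 := by
      rw [if_pos h, if_pos h2]; omega
    rw [hn, List.range_succ_eq_map]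
    simp only [List.map_cons, List.map_map]
    congr 1
    · simp
    · exact List.map_congr_left fun k _ => by
        simp only [Function.comp_apply, Nat.succ_eq_add_one]
        push_cast
        ring
  · have hn1 : (if a < b then ((b - a + 2 - 1) / 2).toNat else 0) = 1 := by
      rw [if_pos h]; omega
    have hn2 : (if a + 2 < b then ((b - (a + 2) + 2 - 1) / 2).toNat else 0) = 0 := by
      rw [if_neg h2]
    rw [hn1, hn2]
    simp

lemma pvRange_two_nil (a b : Int) (h : ¬ a < b) : PySem.List.pyRange a b 2 = [] := by
  rw [PySem.List.pyRange_of_pos _ _ (by norm_num), if_neg h]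
  simp

lemma pvChunkAux (buf : List Char) : ∀ pre : List Char,
    (PySem.List.pyRange (pre.length : Int) ((pre.length : Int) + (buf.length : Int)) 2).map
      (fun k => String.ofList (PySem.List.slice (pre ++ buf) (some k) (some (k + 2))))
      = (pvChunk buf).map String.ofList := by
  induction buf using pvChunk.induct with
  | case1 =>
    intro pre
    rw [pvRange_two_nil _ _ (by simp)]
    simp [pvChunk]
  | case2 a =>
    intro pre
    rw [pvRange_two_cons _ _ (by simp),
      pvRange_two_nil _ _ (by simp)]
    have hsl : PySem.List.slice (pre ++ [a]) (some (pre.length : Int)) (some ((pre.length : Int) + 2)) = [a] := by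
      rw [show ((pre.length : Int) + 2) = ((pre.length + 2 : Nat) : Int) by push_cast; ring,
        PySem.List.slice_natCast, List.drop_left]
      simp
    simp only [List.map_cons, List.map_nil]
    rw [hsl]
    simp [pvChunk]
  | case3 a b r ih =>
    intro pre
    rw [pvRange_two_cons _ _ (by simp; omega)]
    simp only [List.map_cons]
    have hsl : PySem.List.slice (pre ++ a :: b :: r) (some (pre.length : Int)) (some ((pre.length : Int) + 2)) = [a, b] := by
      rw [show ((pre.length : Int) + 2) = ((pre.length + 2 : Nat) : Int) by push_cast; ring,
        PySem.List.slice_natCast, List.drop_left]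
      simp
    rw [hsl]
    have hpre : pre ++ a :: b :: r = (pre ++ [a, b]) ++ r := by simp
    have hlen : ((pre.length : Int) + 2) = (((pre ++ [a, b]).length : Nat) : Int) := by
      simp
    have hb : ((pre.length : Int) + ((a :: b :: r).length : Int))
        = (((pre ++ [a, b]).length : Nat) : Int) + ((r.length : Int)) := by
      simp
      ring
    rw [hpre, hlen, hb, ih (pre ++ [a, b])]
    simp [pvChunk]

lemma pvMain (m2 : List Char) :
    pvLoopA m2 0 =
      (PySem.List.pyRange 0 (((m2.foldl pvStepB []).length : Nat) : Int) 2).map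
        (fun k => String.ofList (PySem.List.slice (m2.foldl pvStepB []) (some k) (some (k + 2)))) := by
  have hbuf : m2.foldl pvStepB [] = pvGoE m2 := by
    simpa using (pvFoldl_step m2).1 [] (by simp)
  rw [pvLoopA_eq m2 0, hbuf, List.drop_zero]
  have h := pvChunkAux (pvGoE m2) []
  simp only [List.nil_append, List.length_nil, Nat.cast_zero, zero_add] at h
  rw [h, (pvChunk_go m2).1]

-- ===== VERDICT (by name: the statement is the Claim_ definition above) =====
theorem preprocesar_mensaje_spec : Claim_equal_preprocesar_mensaje := by
  intro mensaje _
  show preprocesar_mensaje mensaje = preprocesar_mensaje_alt mensaje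
  exact pvMain _
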